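-- pv_equiv track=rewrite | github.com/jcausse/clases_uca_ig | unidad_5/ej10.py | verificar_texto
-- ===== SOURCE A (Python) =====
-- def verificar_palabra(p_texto, p):
--     """
--     Verifica si la palabra del texto, p_texto, esta formada exactamente por los caracteres
--     de la otra palabra, p.
--     No puede haber ningun caracter en p_texto que no este en p, ni viceversa (sin importar las
--     repeticiones que cada caracter tenga en cada palabra, los caracteres pueden estar tanto
--     una sola vez como repetidos en ambas palabras, sin cambiar el resultado.)
--     Se asume que tanto p_texto como p estan en minusculas.
--     Ejemplos:
--     - p_texto = 'baila', p = 'bala' devuelve False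
--     - p_texto = 'alla', p = 'al' devuelve True
--     - p_texto = 'casa', p = 'saca' devuelve True
--     - p_texto = 'alla', p = 'halla' devuelve False
--     """
--     # Verifico que todos los caracteres de p_texto esten en p
--     cumple = True                           # Arranco asumiendo que van a cumplir la condicion
--     i = 0
--     while i < len(p_texto) and cumple:      # Para cada caracter en p_texto
--         if p_texto[i] not in p:             # Si el caracter no esta en p, deja de cumplir
--             cumple = False                  # Al hacer cumple = False, se corta el ciclo
--         i += 1
--
--     # Verifico que todos los caracteres de p esten en p_texto. Esto puede ser mas eficiente, pero lo
--     # hacemos asi por simplicidad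
--     if cumple:                              # Solo hago la verificacion en el caso de que lo anterior
--         i = 0                               # lo siga cumpliendo
--         while i < len(p) and cumple:        # Para cada caracter en p
--             if p[i] not in p_texto:         # Si el caracter no esta en p_texto, deja de cumplir
--                 cumple = False              # Al hacer cumple = False, se corta el ciclo
--             i += 1
--
--     return cumple                           # Si cumple se hizo false, devuelve False (porque no cumple)
--
-- def verificar_texto(t, p):
--     cumple = False
--     i = 0
--     inicio = 0                                      # Indice de inicio para recortar la palabra
--     fin = 0                                         # Indice de fin para recortar la palabra
--     while i < len(t) and not cumple:                # Para cada caracter en el texto, y mientras no se cumpla la condicion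
--         if t[i] == ' ':                             # Si es un espacio, aca termina una palabra y arranca otra
--             fin = i                                 # Marco el fin de la palabra actual
--             # Si la palabra actual cumple la condicion, verificar_palabra me devuelve True, por lo que la variable cumple
--             # se hace True, y el ciclo corta. Si devuelve False, cumple se mantiene en False, y continua el ciclo
--             cumple = verificar_palabra(t[inicio:fin], p)
--             inicio = i + 1                          # Marco el inicio de la palabra siguiente
--         i += 1
--
--     # Verifico la ultima palabra aparte, pero solo si no hubo una palabra antes que cumpla
--     if not cumple:
--         cumple = verificar_palabra(t[inicio:len(t)], p)
--
--     return cumple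
-- ===== SOURCE B (Python) =====
-- def verificar_texto(t, p):
--     sp = set(p)
--     return any(set(w) == sp for w in t.split(' '))
-- ===== Notes on version B (the rewrite author's own statement) =====
-- stated objective: faster
-- what changed: Replaces A's manual index scan with inicio/fin word-boundary bookkeeping and the two inner char-membership while-loops (each 'c in word' rescanning the string) by computing set(p) once, splitting on ' ' and testing set equality per word with any().
import Mathlib
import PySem

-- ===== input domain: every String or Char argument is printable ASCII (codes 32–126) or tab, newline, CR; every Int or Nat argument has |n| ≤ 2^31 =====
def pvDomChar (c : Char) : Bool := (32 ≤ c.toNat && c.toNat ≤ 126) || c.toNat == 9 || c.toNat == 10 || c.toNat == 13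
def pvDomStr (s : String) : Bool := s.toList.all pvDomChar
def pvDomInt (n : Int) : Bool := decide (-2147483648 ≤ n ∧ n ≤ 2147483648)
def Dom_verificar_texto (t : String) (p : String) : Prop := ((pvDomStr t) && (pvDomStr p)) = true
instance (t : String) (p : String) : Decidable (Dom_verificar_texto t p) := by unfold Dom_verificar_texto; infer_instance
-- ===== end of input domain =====

-- B replaces A's manual index scan (inicio/fin bookkeeping + two char-membership while-loops per word)
-- by computing set(p) once, splitting on ' ' and testing set equality per word; objective: simpler.

-- ===== PORT A =====
-- first while-loop of verificar_palabra: every char of p_texto is in p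
def vpLoop1 (pt p : List Char) (i : Nat) (cumple : Bool) : Bool :=
  if h : i < pt.length ∧ cumple = true then
    vpLoop1 pt p (i + 1)
      (if PySem.Chars.isIn [pt.getD i ' '] p = false then false else cumple)
  else cumple
termination_by pt.length - i
decreasing_by omega

-- second while-loop of verificar_palabra: every char of p is in p_texto
def vpLoop2 (pt p : List Char) (i : Nat) (cumple : Bool) : Bool :=
  if h : i < p.length ∧ cumple = true then
    vpLoop2 pt p (i + 1)
      (if PySem.Chars.isIn [p.getD i ' '] pt = false then false else cumple)
  else cumple
termination_by p.length - i
decreasing_by omega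

def verificar_palabra (pt p : List Char) : Bool :=
  let cumple := vpLoop1 pt p 0 true
  if cumple then vpLoop2 pt p 0 cumple else cumple

-- main while-loop of verificar_texto; returns (cumple, inicio)
def vtLoop (t p : List Char) (i inicio : Nat) (cumple : Bool) : Bool × Nat :=
  if h : i < t.length ∧ cumple = false then
    if t.getD i ' ' = ' ' then
      vtLoop t p (i + 1) (i + 1)
        (verificar_palabra (PySem.List.slice t (some (inicio : Int)) (some (i : Int))) p)
    else vtLoop t p (i + 1) inicio cumple
  else (cumple, inicio)
termination_by t.length - i
decreasing_by all_goals omega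

def verificar_texto (t : String) (p : String) : Bool :=
  let r := vtLoop t.toList p.toList 0 0 false
  if r.1 = false then
    verificar_palabra
      (PySem.List.slice t.toList (some (r.2 : Int)) (some (t.toList.length : Int))) p.toList
  else r.1

-- ===== PORT B =====
def verificar_texto_alt (t : String) (p : String) : Bool :=
  let sp : PySem.Set Char := PySem.Set.ofList p.toList
  (PySem.Chars.splitOn t.toList [' ']).any
    (fun w => PySem.Set.equal (PySem.Set.ofList w) sp)

-- ===== PRECONDITION & SPEC =====
def Spec_verificar_texto (t : String) (p : String) (out : Bool) : Prop := out = verificar_texto_alt t p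
instance (t : String) (p : String) (out : Bool) : Decidable (Spec_verificar_texto t p out) := by unfold Spec_verificar_texto; infer_instance

-- ===== CLAIM (what is proved, stated in full; the proofs are below) =====
def Claim_equal_verificar_texto : Prop := ∀ (t : String) (p : String), Dom_verificar_texto t p → Spec_verificar_texto t p (verificar_texto t p)

-- ===== LEMMAS AND PROOFS =====

-- proof-side reference split: Python's t.split(' ') as plain structural recursion
def splitSp : List Char → List (List Char)
  | [] => [[]]
  | c :: rest =>
    if c = ' ' then [] :: splitSp rest
    else (c :: (splitSp rest).headD []) :: (splitSp rest).tail

theorem splitSp_ne_nil (l : List Char) : splitSp l ≠ [] := by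
  cases l with
  | nil => simp [splitSp]
  | cons c rest => simp only [splitSp]; split <;> simp

theorem splitSp_cons_eq (l : List Char) :
    (splitSp l).headD [] :: (splitSp l).tail = splitSp l := by
  cases h : splitSp l with
  | nil => exact absurd h (splitSp_ne_nil l)
  | cons w ws => simp

theorem go_eq_splitSp (fuel : Nat) :
    ∀ (l cur : List Char) (acc : List (List Char)), l.length < fuel →
    PySem.Chars.splitOn.go [' '] fuel l cur acc =
      acc.reverse ++ (cur.reverse ++ (splitSp l).headD []) :: (splitSp l).tail := by
  induction fuel with
  | zero => intro l cur acc h; omega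
  | succ n ih =>
    intro l cur acc h
    cases l with
    | nil => simp [PySem.Chars.splitOn.go, splitSp]
    | cons c rest =>
      by_cases hc : c = ' '
      · subst hc
        simp only [PySem.Chars.splitOn.go, List.isPrefixOf, beq_self_eq_true,
          Bool.true_and, if_true, List.length_cons,
          List.length_nil, List.drop_succ_cons, List.drop_zero]
        rw [ih rest [] (cur.reverse :: acc) (by simpa using h)]
        simp [splitSp]
        simpa using splitSp_cons_eq rest
      · simp only [PySem.Chars.splitOn.go, List.isPrefixOf]
        rw [if_neg (by simp [Ne.symm hc]), ih rest (c :: cur) acc (by simpa using h)]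
        simp [splitSp, hc]

theorem splitOn_eq_splitSp (l : List Char) :
    PySem.Chars.splitOn l [' '] = splitSp l := by
  unfold PySem.Chars.splitOn
  rw [go_eq_splitSp (l.length + 1) l [] [] (by omega)]
  simpa using splitSp_cons_eq l

theorem isIn_singleton (c : Char) (p : List Char) :
    PySem.Chars.isIn [c] p = true ↔ c ∈ p := by
  rw [PySem.Chars.isIn_iff_infix]
  constructor
  · intro h; exact h.subset (List.mem_singleton_self c)
  · intro h
    obtain ⟨s, t, rfl⟩ := List.append_of_mem h
    exact ⟨s, t, by simp⟩

theorem vpLoop1_eq (pt p : List Char) (i : Nat) (c : Bool) :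
    vpLoop1 pt p i c = (c && (pt.drop i).all fun ch => PySem.Chars.isIn [ch] p) := by
  fun_induction vpLoop1 pt p i c with
  | case1 i c h ih =>
    obtain ⟨hi, hc⟩ := h
    subst hc
    simp only [dite_eq_ite] at ih
    rw [ih, List.getD_eq_getElem pt ' ' hi]
    by_cases hm : PySem.Chars.isIn [pt[i]] p = false
    · rw [if_pos hm]
      simp only [Bool.false_and, Bool.true_and]
      symm
      rw [List.all_eq_false]
      refine ⟨pt[i], ?_, ?_⟩
      · rw [List.drop_eq_getElem_cons hi]
        exact List.mem_cons_self ..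
      · rw [hm]
        exact Bool.false_ne_true
    · have hm' : PySem.Chars.isIn [pt[i]] p = true := by simpa using hm
      rw [if_neg hm]
      simp only [Bool.true_and]
      rw [List.drop_eq_getElem_cons hi, List.all_cons, hm', Bool.true_and]
  | case2 i c h =>
    by_cases hc : c = true
    · have : ¬ i < pt.length := fun hi => h ⟨hi, hc⟩
      rw [List.drop_eq_nil_of_le (by omega)]
      simp
    · rw [Bool.not_eq_true] at hc
      simp [hc]

theorem vpLoop2_eq (pt p : List Char) (i : Nat) (c : Bool) :
    vpLoop2 pt p i c = (c && (p.drop i).all fun ch => PySem.Chars.isIn [ch] pt) := by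
  fun_induction vpLoop2 pt p i c with
  | case1 i c h ih =>
    obtain ⟨hi, hc⟩ := h
    subst hc
    simp only [dite_eq_ite] at ih
    rw [ih, List.getD_eq_getElem p ' ' hi]
    by_cases hm : PySem.Chars.isIn [p[i]] pt = false
    · rw [if_pos hm]
      simp only [Bool.false_and, Bool.true_and]
      symm
      rw [List.all_eq_false]
      refine ⟨p[i], ?_, ?_⟩
      · rw [List.drop_eq_getElem_cons hi]
        exact List.mem_cons_self ..
      · rw [hm]
        exact Bool.false_ne_true
    · have hm' : PySem.Chars.isIn [p[i]] pt = true := by simpa using hm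
      rw [if_neg hm]
      simp only [Bool.true_and]
      rw [List.drop_eq_getElem_cons hi, List.all_cons, hm', Bool.true_and]
  | case2 i c h =>
    by_cases hc : c = true
    · have : ¬ i < p.length := fun hi => h ⟨hi, hc⟩
      rw [List.drop_eq_nil_of_le (by omega)]
      simp
    · rw [Bool.not_eq_true] at hc
      simp [hc]

theorem vp_eq_all (pt p : List Char) :
    verificar_palabra pt p =
      ((pt.all fun ch => PySem.Chars.isIn [ch] p) &&
        (p.all fun ch => PySem.Chars.isIn [ch] pt)) := by
  unfold verificar_palabra
  simp only [vpLoop1_eq, vpLoop2_eq, List.drop_zero, Bool.true_and]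
  by_cases h1 : (pt.all fun ch => PySem.Chars.isIn [ch] p) = true
  · simp [h1]
  · rw [Bool.not_eq_true] at h1
    simp [h1]

theorem vp_eq_set (pt p : List Char) :
    verificar_palabra pt p =
      PySem.Set.equal (PySem.Set.ofList pt) (PySem.Set.ofList p) := by
  rw [vp_eq_all, Bool.eq_iff_iff, PySem.Set.equal_iff]
  simp only [Bool.and_eq_true, List.all_eq_true, PySem.Set.mem_ofList, isIn_singleton]
  constructor
  · rintro ⟨ha, hb⟩ x
    exact ⟨fun hx => ha x hx, fun hx => hb x hx⟩
  · intro h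
    exact ⟨fun x hx => (h x).mp hx, fun x hx => (h x).mpr hx⟩

theorem splitSp_no_space (l : List Char) (h : ∀ c ∈ l, c ≠ ' ') : splitSp l = [l] := by
  induction l with
  | nil => rfl
  | cons c rest ih =>
    have hc : c ≠ ' ' := h c (by simp)
    rw [splitSp, if_neg hc, ih (fun d hd => h d (by simp [hd]))]
    simp

theorem splitSp_word (w rest : List Char) (h : ∀ c ∈ w, c ≠ ' ') :
    splitSp (w ++ ' ' :: rest) = w :: splitSp rest := by
  induction w with
  | nil => simp [splitSp]
  | cons c cw ih =>
    have hc : c ≠ ' ' := h c (by simp)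
    rw [List.cons_append, splitSp, if_neg hc, ih (fun d hd => h d (by simp [hd]))]
    simp

theorem drop_no_space (tl : List Char) (a b : Nat) (hb : b ≤ tl.length)
    (h : ∀ j, a ≤ j → j < b → tl.getD j ' ' ≠ ' ') :
    ∀ c ∈ (tl.drop a).take (b - a), c ≠ ' ' := by
  intro c hc
  rw [List.mem_iff_getElem] at hc
  obtain ⟨k, hk, hck⟩ := hc
  simp only [List.getElem_take, List.getElem_drop] at hck
  have hlen : a + k < tl.length := by
    have := hk
    simp only [List.length_take, List.length_drop] at this
    omega
  have hkb : a + k < b := by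
    have := hk
    simp only [List.length_take, List.length_drop] at this
    omega
  have := h (a + k) (by omega) hkb
  rw [List.getD_eq_getElem tl ' ' hlen] at this
  exact hck ▸ this

theorem vtMain (tl pl : List Char) :
    ∀ (n i inicio : Nat), tl.length - i ≤ n → inicio ≤ i → i ≤ tl.length →
    (∀ j, inicio ≤ j → j < i → tl.getD j ' ' ≠ ' ') →
    (if (vtLoop tl pl i inicio false).1 = false then
      verificar_palabra
        (PySem.List.slice tl (some ((vtLoop tl pl i inicio false).2 : Int))
          (some (tl.length : Int))) pl
     else (vtLoop tl pl i inicio false).1)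
    = (splitSp (tl.drop inicio)).any (fun w => verificar_palabra w pl) := by
  have final : ∀ (inicio : Nat), inicio ≤ tl.length →
      (∀ j, inicio ≤ j → j < tl.length → tl.getD j ' ' ≠ ' ') →
      verificar_palabra
        (PySem.List.slice tl (some (inicio : Int)) (some (tl.length : Int))) pl
      = (splitSp (tl.drop inicio)).any (fun w => verificar_palabra w pl) := by
    intro inicio hle h3
    have hsl : PySem.List.slice tl (some (inicio : Int)) (some (tl.length : Int))
        = tl.drop inicio := by
      rw [show ((tl.length : Int)) = ((tl.length : Nat) : Int) from rfl,
        PySem.List.slice_natCast]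
      exact List.take_of_length_le (by simp)
    have hns : ∀ c ∈ tl.drop inicio, c ≠ ' ' := by
      have := drop_no_space tl inicio tl.length le_rfl h3
      rwa [List.take_of_length_le (by simp)] at this
    rw [hsl, splitSp_no_space _ hns]
    simp
  intro n
  induction n with
  | zero =>
    intro i inicio hn h1 h2 h3
    have hi : i = tl.length := by omega
    subst hi
    rw [vtLoop]
    simp only [lt_irrefl, false_and, dif_neg, not_false_eq_true]
    simpa using final inicio h1 h3
  | succ n ih =>
    intro i inicio hn h1 h2 h3
    by_cases hi : i < tl.length
    · rw [vtLoop, dif_pos ⟨hi, rfl⟩]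
      have hsplit : tl.drop inicio =
          (tl.drop inicio).take (i - inicio) ++ tl.drop i := by
        have h0 := List.take_append_drop (i - inicio) (tl.drop inicio)
        rw [List.drop_drop, show inicio + (i - inicio) = i by omega] at h0
        exact h0.symm
      have hword : PySem.List.slice tl (some (inicio : Int)) (some (i : Int))
          = (tl.drop inicio).take (i - inicio) := PySem.List.slice_natCast tl inicio i
      have hwns : ∀ c ∈ (tl.drop inicio).take (i - inicio), c ≠ ' ' :=
        drop_no_space tl inicio i (by omega) h3
      by_cases hsp : tl.getD i ' ' = ' '
      · rw [if_pos hsp]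
        have hdropi : tl.drop i = ' ' :: tl.drop (i + 1) := by
          rw [List.drop_eq_getElem_cons hi]
          rw [List.getD_eq_getElem tl ' ' hi] at hsp
          rw [hsp]
        have hrhs : splitSp (tl.drop inicio)
            = (tl.drop inicio).take (i - inicio) :: splitSp (tl.drop (i + 1)) := by
          conv_lhs => rw [hsplit, hdropi]
          exact splitSp_word _ _ hwns
        by_cases hvp :
            verificar_palabra (PySem.List.slice tl (some (inicio : Int)) (some (i : Int))) pl
            = true
        · rw [hvp, vtLoop]
          simp only [Bool.true_eq_false, and_false, dif_neg, not_false_eq_true]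
          simp only [if_false]
          rw [hrhs]
          rw [hword] at hvp
          simp [List.any_cons, hvp]
        · rw [Bool.not_eq_true] at hvp
          rw [hvp, ih (i + 1) (i + 1) (by omega) le_rfl (by omega) (by omega)]
          rw [hrhs]
          rw [hword] at hvp
          simp [List.any_cons, hvp]
      · rw [if_neg hsp]
        refine ih (i + 1) inicio (by omega) (by omega) (by omega) ?_
        intro j hj1 hj2
        by_cases hji : j < i
        · exact h3 j hj1 hji
        · have : j = i := by omega
          subst this
          exact hsp
    · have hieq : i = tl.length := by omega
      subst hieq
      rw [vtLoop]
      simp only [lt_irrefl, false_and, dif_neg, not_false_eq_true]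
      simpa using final inicio h1 h3

-- ===== VERDICT (by name: the statement is the Claim_ definition above) =====
theorem verificar_texto_spec : Claim_equal_verificar_texto := by
  intro t p _
  unfold Spec_verificar_texto verificar_texto verificar_texto_alt
  rw [splitOn_eq_splitSp]
  have := vtMain t.toList p.toList t.toList.length 0 0 (by omega) le_rfl (by omega)
    (by intro j hj1 hj2; omega)
  simp only [List.drop_zero] at this
  rw [this]
  exact PySem.List.any_congr_mem (fun w _ => vp_eq_set w p.toList)
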